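-- pv_equiv track=rewrite | github.com/alexander-travov/algo | InterviewBit/TreeDataStructure/HotelReviews.py | sort_reviews
-- ===== SOURCE A (Python) =====
-- class Trie:
--     def __init__(self, word_end=False):
--         self.word_end = word_end
--         self.children = {}
--
--     def add(self, word):
--         node = self
--         for l in word:
--             if l not in node.children:
--                 node.children[l] = Trie()
--             node = node.children[l]
--         node.word_end = True
--
--     def __contains__(self, word):
--         node = self
--         for l in word:
--             if l not in node.children:
--                 return False
--             node = node.children[l]
--         return node.word_end
--
-- def sort_reviews(reviews, good_words):
--     trie = Trie()
--     for w in good_words.split('_'):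
--         trie.add(w)
--
--     def num_matches(review):
--         return sum(w in trie for w in review.split('_'))
--
--     reviews.sort(key=num_matches, reverse=True)
--     return reviews
-- ===== SOURCE B (Python) =====
-- def sort_reviews(reviews, good_words):
--     good = set(good_words.split('_'))
--     reviews.sort(key=lambda review: sum(w in good for w in review.split('_')), reverse=True)
--     return reviews
-- ===== Notes on version B (the rewrite author's own statement) =====
-- stated objective: simpler
-- what changed: Replaces the whole character-by-character Trie class (add/__contains__ tree walks per word) with a single hash set built once from good_words.split('_'); the in-place stable reverse sort by match count is kept.
import Mathlib
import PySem

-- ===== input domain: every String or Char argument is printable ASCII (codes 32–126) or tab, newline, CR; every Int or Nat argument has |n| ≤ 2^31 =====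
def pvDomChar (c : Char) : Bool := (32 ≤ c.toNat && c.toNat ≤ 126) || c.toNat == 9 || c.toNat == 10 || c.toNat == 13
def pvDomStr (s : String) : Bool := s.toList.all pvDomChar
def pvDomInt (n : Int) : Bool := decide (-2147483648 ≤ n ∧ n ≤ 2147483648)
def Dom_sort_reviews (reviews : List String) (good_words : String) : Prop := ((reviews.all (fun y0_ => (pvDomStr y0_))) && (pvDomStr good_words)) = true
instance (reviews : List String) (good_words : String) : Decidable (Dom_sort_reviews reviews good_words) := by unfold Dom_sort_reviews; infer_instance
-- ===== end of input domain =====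

-- B replaces A's character-by-character Trie (class with add/__contains__) by one hash set of
-- the good words; the stable in-place reverse sort by match count is unchanged (return value
-- equivalence; both Pythons sort the argument list in place the same way).

-- ===== PORT A =====
-- Python's Trie has `children : dict[char, Trie]`; a nested inductive is not allowed, so the
-- children dict (association list in insertion order, unique keys) is the mutual type PvChildren.
mutual
inductive PvTrie : Type
  | mk : Bool → PvChildren → PvTrie
inductive PvChildren : Type
  | nil : PvChildren
  | cons : Char → PvTrie → PvChildren → PvChildren
end

-- Trie.add: walk the word, creating missing children (Trie() = mk false nil), set word_end at the end.
mutual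
def PvTrie.add : PvTrie → List Char → PvTrie
  | .mk _ ch, [] => .mk true ch
  | .mk e ch, c :: rest => .mk e (PvChildren.add ch c rest)
def PvChildren.add : PvChildren → Char → List Char → PvChildren
  | .nil, c, rest => .cons c (PvTrie.add (.mk false .nil) rest) .nil
  | .cons c0 t0 ch0, c, rest =>
      if c0 = c then .cons c0 (PvTrie.add t0 rest) ch0
      else .cons c0 t0 (PvChildren.add ch0 c rest)
end

-- Trie.__contains__: walk the word; False on a missing child, word_end at the end.
mutual
def PvTrie.containsW : PvTrie → List Char → Bool
  | .mk e _, [] => e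
  | .mk _ ch, c :: rest => PvChildren.containsW ch c rest
def PvChildren.containsW : PvChildren → Char → List Char → Bool
  | .nil, _, _ => false
  | .cons c0 t0 ch0, c, rest =>
      if c0 = c then PvTrie.containsW t0 rest else PvChildren.containsW ch0 c rest
end

-- split('_') never raises (separator nonempty), so the .getD [] default is never used.
def sort_reviews (reviews : List String) (good_words : String) : List String :=
  let trie : PvTrie :=
    ((PySem.Str.split? good_words "_").getD []).foldl
      (fun tr w => PvTrie.add tr w.toList) (.mk false .nil)
  let num_matches : String → Int := fun review =>
    (((PySem.Str.split? review "_").getD []).map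
      (fun w => if PvTrie.containsW trie w.toList then (1 : Int) else 0)).sum
  PySem.List.sorted reviews num_matches true

-- ===== PORT B =====
def sort_reviews_alt (reviews : List String) (good_words : String) : List String :=
  let good : PySem.Set String := PySem.Set.ofList ((PySem.Str.split? good_words "_").getD [])
  PySem.List.sorted reviews
    (fun review =>
      (((PySem.Str.split? review "_").getD []).map
        (fun w => if PySem.Set.contains good w then (1 : Int) else 0)).sum)
    true

-- ===== PRECONDITION & SPEC =====
def Spec_sort_reviews (reviews : List String) (good_words : String) (out : List String) : Prop := out = sort_reviews_alt reviews good_words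
instance (reviews : List String) (good_words : String) (out : List String) : Decidable (Spec_sort_reviews reviews good_words out) := by unfold Spec_sort_reviews; infer_instance

-- ===== CLAIM (what is proved, stated in full; the proofs are below) =====
def Claim_equal_sort_reviews : Prop := ∀ (reviews : List String) (good_words : String), Dom_sort_reviews reviews good_words → Spec_sort_reviews reviews good_words (sort_reviews reviews good_words)

-- ===== LEMMAS AND PROOFS =====

theorem pv_contains_empty (v : List Char) : PvTrie.containsW (.mk false .nil) v = false := by
  cases v with
  | nil => rfl
  | cons c rest => simp [PvTrie.containsW, PvChildren.containsW]

mutual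
theorem pv_contains_add (t : PvTrie) (w v : List Char) :
    PvTrie.containsW (PvTrie.add t w) v = (decide (v = w) || PvTrie.containsW t v) := by
  cases t with
  | mk e ch =>
    cases w with
    | nil =>
      cases v with
      | nil => simp [PvTrie.add, PvTrie.containsW]
      | cons c rest => simp [PvTrie.add, PvTrie.containsW]
    | cons c rest =>
      cases v with
      | nil => simp [PvTrie.add, PvTrie.containsW]
      | cons c' rest' =>
        simp only [PvTrie.add, PvTrie.containsW, pv_contains_addC ch c rest c' rest']
        by_cases h1 : c' = c <;> by_cases h2 : rest' = rest <;> simp [h1, h2]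
theorem pv_contains_addC (ch : PvChildren) (c : Char) (rest : List Char)
    (c' : Char) (v' : List Char) :
    PvChildren.containsW (PvChildren.add ch c rest) c' v' =
      ((decide (c' = c) && decide (v' = rest)) || PvChildren.containsW ch c' v') := by
  cases ch with
  | nil =>
    by_cases h : c = c'
    · subst h
      simp [PvChildren.add, PvChildren.containsW,
        pv_contains_add (.mk false .nil) rest v', pv_contains_empty]
    · have h' : ¬ c' = c := fun hh => h hh.symm
      simp [PvChildren.add, PvChildren.containsW, h, h']
  | cons c0 t0 ch0 =>
    by_cases h0 : c0 = c
    · subst h0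
      by_cases h1 : c0 = c'
      · subst h1
        simp [PvChildren.add, PvChildren.containsW, pv_contains_add t0 rest v']
      · have h1' : ¬ c' = c0 := fun hh => h1 hh.symm
        simp [PvChildren.add, PvChildren.containsW, h1, h1']
    · by_cases h1 : c0 = c'
      · subst h1
        have h0' : ¬ c = c0 := fun hh => h0 hh.symm
        simp [PvChildren.add, PvChildren.containsW, h0]
      · have h1' : ¬ c' = c0 := fun hh => h1 hh.symm
        simp [PvChildren.add, PvChildren.containsW, h0, h1,
          pv_contains_addC ch0 c rest c' v']
end

theorem pv_contains_foldl (ws : List String) (t : PvTrie) (v : String) :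
    PvTrie.containsW (ws.foldl (fun tr w => PvTrie.add tr w.toList) t) v.toList =
      (decide (v ∈ ws) || PvTrie.containsW t v.toList) := by
  induction ws generalizing t with
  | nil => simp
  | cons w ws ih =>
    simp only [List.foldl_cons, ih, pv_contains_add]
    by_cases hvw : v = w
    · subst hvw; simp
    · have hne : ¬ v.toList = w.toList := fun hh => hvw (String.toList_inj.mp hh)
      simp [hvw, hne]

theorem pv_set_contains (ws : List String) (v : String) :
    PySem.Set.contains (PySem.Set.ofList ws) v = decide (v ∈ ws) := by
  have h := PySem.Set.mem_ofList ws v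
  by_cases hv : v ∈ ws
  · simp [PySem.Set.contains, h, hv]
  · simp [PySem.Set.contains, h, hv]

-- ===== VERDICT (by name: the statement is the Claim_ definition above) =====
theorem sort_reviews_spec : Claim_equal_sort_reviews := by
  intro reviews good_words _
  unfold Spec_sort_reviews sort_reviews sort_reviews_alt
  dsimp only
  congr 1
  funext review
  congr 1
  refine List.map_congr_left fun w _ => ?_
  rw [pv_set_contains, pv_contains_foldl, pv_contains_empty]
  simp
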